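-- pv_equiv track=rewrite | github.com/markjbrown/fabric-cosmos-mirror | python/fabric_client.py | derive_account_name
-- ===== SOURCE A (Python) =====
-- def derive_account_name(endpoint: str) -> str:
--     """Extract the Cosmos DB account name from an endpoint URL.
--
--     Example::
--
--         "https://myaccount.documents.azure.com:443/" → "myaccount"
--     """
--     host = endpoint
--     for prefix in ("https://", "http://"):
--         if host.startswith(prefix):
--             host = host[len(prefix):]
--             break
--     # Strip port / path
--     for sep in (":", "/"):
--         idx = host.find(sep)
--         if idx != -1:
--             host = host[:idx]
--     # Strip domain suffix
--     idx = host.find(".")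
--     if idx != -1:
--         return host[:idx]
--     return host
-- ===== SOURCE B (Python) =====
-- def derive_account_name(endpoint: str) -> str:
--     host = endpoint
--     for prefix in ("https://", "http://"):
--         if host.startswith(prefix):
--             host = host[len(prefix):]
--             break
--     name = []
--     for ch in host:
--         if ch == '.' or ch == ':' or ch == '/':
--             break
--         name.append(ch)
--     return "".join(name)
-- ===== Notes on version B (the rewrite author's own statement) =====
-- stated objective: simpler
-- what changed: A truncates the host by three sequential find/slice passes (at ':', then '/', then '.'); B makes one single pass that collects characters until the first '.', ':' or '/'.
import Mathlib
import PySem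

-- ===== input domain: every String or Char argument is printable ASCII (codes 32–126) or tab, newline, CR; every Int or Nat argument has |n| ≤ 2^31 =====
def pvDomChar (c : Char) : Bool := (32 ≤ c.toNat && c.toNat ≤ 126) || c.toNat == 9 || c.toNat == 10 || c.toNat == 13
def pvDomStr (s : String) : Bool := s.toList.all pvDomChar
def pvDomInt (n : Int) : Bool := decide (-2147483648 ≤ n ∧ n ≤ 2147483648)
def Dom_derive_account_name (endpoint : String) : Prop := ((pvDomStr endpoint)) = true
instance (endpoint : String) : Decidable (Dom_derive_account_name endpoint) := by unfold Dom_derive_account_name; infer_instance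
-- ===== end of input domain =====

-- B replaces A's three sequential find/slice truncation passes by one single collecting
-- pass that stops at the first '.', ':' or '/' (objective: simpler; same behaviour).

-- ===== PORT A =====
-- shared helper: the scheme-stripping loop, identical in A's and B's Python
-- (for prefix in ("https://", "http://"): if host.startswith(prefix): host = host[len(prefix):]; break)
def pvStripScheme (host : List Char) : List Char :=
  if PySem.Chars.startswith host "https://".toList then PySem.List.slice host (some 8) none
  else if PySem.Chars.startswith host "http://".toList then PySem.List.slice host (some 7) none
  else host

-- A's truncation step, used for sep in ":", "/" and then for ".":
-- idx = host.find(sep); if idx != -1: host = host[:idx]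
def pvTruncA (host : List Char) (sep : Char) : List Char :=
  let idx := PySem.Chars.find host [sep]
  if idx ≠ -1 then PySem.List.slice host none (some idx) else host

def derive_account_name (endpoint : String) : String :=
  String.ofList (pvTruncA (pvTruncA (pvTruncA (pvStripScheme endpoint.toList) ':') '/') '.')

-- ===== PORT B =====
-- B's single collecting pass: for ch in host: if ch == '.' or ch == ':' or ch == '/': break; name.append(ch)
def pvTakeName : List Char → List Char
  | [] => []
  | c :: rest => if c == '.' || c == ':' || c == '/' then [] else c :: pvTakeName rest

def derive_account_name_alt (endpoint : String) : String :=
  String.ofList (pvTakeName (pvStripScheme endpoint.toList))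

-- ===== PRECONDITION & SPEC =====
def Spec_derive_account_name (endpoint : String) (out : String) : Prop := out = derive_account_name_alt endpoint
instance (endpoint : String) (out : String) : Decidable (Spec_derive_account_name endpoint out) := by unfold Spec_derive_account_name; infer_instance

-- ===== CLAIM (what is proved, stated in full; the proofs are below) =====
def Claim_equal_derive_account_name : Prop := ∀ (endpoint : String), Dom_derive_account_name endpoint → Spec_derive_account_name endpoint (derive_account_name endpoint)

-- ===== LEMMAS AND PROOFS =====

theorem pv_take_eq_takeWhile (p : Char → Bool) :
    ∀ (cs : List Char) (n : Nat) (h : n < cs.length),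
      (∀ i (hi : i < n), p (cs[i]'(Nat.lt_trans hi h)) = true) → p (cs[n]) = false →
      cs.take n = cs.takeWhile p
  | [], n, h, _, _ => by simp at h
  | c :: rest, 0, _, _, hn => by
      simp at hn; simp [hn]
  | c :: rest, n + 1, h, hall, hn => by
      have hc : p c = true := hall 0 (by omega)
      simp only [List.take_succ_cons, List.takeWhile_cons, hc, if_true]
      congr 1
      exact pv_take_eq_takeWhile p rest n (by simpa using h)
        (fun i hi => hall (i + 1) (by omega)) (by simpa using hn)

theorem pv_singleton_prefix {a : Char} {l : List Char} : [a] <+: l ↔ l.head? = some a := by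
  cases l with
  | nil => simp
  | cons x xs => simp [List.cons_prefix_cons, eq_comm]

theorem pvTruncA_eq_takeWhile (host : List Char) (sep : Char) :
    pvTruncA host sep = host.takeWhile (fun c => c != sep) := by
  unfold pvTruncA
  by_cases h : PySem.Chars.find host [sep] = -1
  · simp only [h, ne_eq, not_true_eq_false, if_false]
    have hmem : sep ∉ host := by
      have := PySem.Chars.find_eq_neg_one_iff (s := host) (sub := [sep]) |>.mp h
      simpa [List.singleton_infix_iff] using this
    exact (List.takeWhile_eq_self_iff.mpr (by
      intro x hx; simp [bne]; rintro rfl; exact hmem hx)).symm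
  · have hnn : 0 ≤ PySem.Chars.find host [sep] := by
      have := PySem.Chars.neg_one_le_find (s := host) (sub := [sep]); omega
    obtain ⟨hpre, hmin⟩ := PySem.Chars.find_spec (s := host) (sub := [sep]) hnn
    set n := (PySem.Chars.find host [sep]).toNat with hn
    have hhead : host[n]? = some sep := by
      rw [← List.head?_drop]; exact (pv_singleton_prefix.mp hpre)
    have hlt : n < host.length := by
      by_contra hge
      rw [List.getElem?_eq_none (by omega)] at hhead; simp at hhead
    simp only [h, ne_eq, not_false_iff, if_true, PySem.List.slice_to host hnn]
    refine pv_take_eq_takeWhile (fun c => c != sep) host n hlt ?_ ?_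
    · intro i hi
      have hni := hmin i hi
      rw [pv_singleton_prefix, List.head?_drop] at hni
      have hgi : host[i]? = some (host[i]'(Nat.lt_trans hi hlt)) :=
        List.getElem?_eq_getElem (Nat.lt_trans hi hlt)
      simp only [bne_iff_ne, ne_eq]
      intro he; exact hni (by rw [hgi, he])
    · have hcn : host[n] = sep := by
        have := List.getElem?_eq_getElem (l := host) (i := n) hlt
        rw [hhead] at this; exact (Option.some_injective _ this.symm)
      simp [hcn]

theorem pvTakeName_eq_takeWhile (cs : List Char) :
    pvTakeName cs = cs.takeWhile (fun c => !(c == '.' || c == ':' || c == '/')) := by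
  induction cs with
  | nil => rfl
  | cons c rest ih =>
      simp only [pvTakeName, List.takeWhile_cons]
      by_cases h : (c == '.' || c == ':' || c == '/') = true
      · simp [h]
      · simp only [Bool.not_eq_true] at h
        simp [h, ih]

theorem derive_account_name_spec : Claim_equal_derive_account_name := by
  intro endpoint _
  unfold Spec_derive_account_name derive_account_name derive_account_name_alt
  rw [pvTruncA_eq_takeWhile, pvTruncA_eq_takeWhile, pvTruncA_eq_takeWhile,
      pvTakeName_eq_takeWhile, List.takeWhile_takeWhile, List.takeWhile_takeWhile]
  congr 1
  have hfun : ∀ (f g : Char → Bool), (∀ c, f c = g c) →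
      List.takeWhile f (pvStripScheme endpoint.toList) = List.takeWhile g (pvStripScheme endpoint.toList) := by
    intro f g hfg; rw [funext hfg]
  apply hfun
  intro c
  by_cases h1 : c = '.' <;> by_cases h2 : c = ':' <;> by_cases h3 : c = '/' <;> simp [h1, h2, h3]
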